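-- pv_equiv track=rewrite | github.com/mit-cml/appinventor-sources | appinventor/google-cloud-sdk/lib/googlecloudsdk/api_lib/util/resource.py | GetParamsFromPath
-- ===== SOURCE A (Python) =====
-- def GetParamsFromPath(path):
--   """Extract parameters from uri template path.
--
--     See https://tools.ietf.org/html/rfc6570. This function makes simplifying
--     assumption that all parameter names are surrounded by /{ and }/.
--
--   Args:
--     path: str, uri template path.
--   Returns:
--     list(str), list of parameters in the template path.
--   """
--   path = path.split(':')[0]
--   parts = path.split('/')
--   params = []
--   for part in parts:
--     if part.startswith('{') and part.endswith('}'):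
--       part = part[1:-1]
--       if part.startswith('+'):
--         params.append(part[1:])
--       else:
--         params.append(part)
--   return params
-- ===== SOURCE B (Python) =====
-- def _flush(seg, params):
--     if len(seg) >= 2 and seg[:1] == '{' and seg[-1:] == '}':
--         inner = seg[1:-1]
--         params.append(inner[1:] if inner[:1] == '+' else inner)
--
--
-- def GetParamsFromPath(path):
--     params = []
--     seg = ''
--     for ch in path:
--         if ch == ':':
--             break
--         if ch == '/':
--             _flush(seg, params)
--             seg = ''
--         else:
--             seg += ch
--     _flush(seg, params)
--     return params
-- ===== Notes on version B (the rewrite author's own statement) =====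
-- stated objective: alternative
-- what changed: Replaced the two split passes (first on the colon, then on the slash) plus a filter loop over the parts by a single left-to-right character scan that accumulates the current segment, flushes it at each slash separator and at the terminating colon or end of string, and tests/strips the braces at flush time.
import Mathlib
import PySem

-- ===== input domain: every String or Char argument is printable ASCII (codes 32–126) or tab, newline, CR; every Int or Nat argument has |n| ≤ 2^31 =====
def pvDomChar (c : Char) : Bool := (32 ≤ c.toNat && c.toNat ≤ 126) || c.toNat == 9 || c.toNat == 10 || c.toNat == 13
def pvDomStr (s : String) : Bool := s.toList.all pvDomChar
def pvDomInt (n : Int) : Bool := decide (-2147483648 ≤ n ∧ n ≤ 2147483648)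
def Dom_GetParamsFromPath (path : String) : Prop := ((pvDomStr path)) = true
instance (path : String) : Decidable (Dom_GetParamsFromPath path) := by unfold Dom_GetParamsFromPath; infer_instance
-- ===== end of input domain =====

-- B replaces A's split-on-':' / split-on-'/' passes by one character scan that flushes the
-- current segment at each '/' (or at ':' / end); alternative decomposition, same O(n) cost.

-- ===== PORT A =====
-- loop body of A's 'for part in parts' (named helper; branches in A's order)
def aBody (params : List String) (part : List Char) : List String :=
  if PySem.Chars.startswith part ['{'] && PySem.Chars.endswith part ['}'] then
    -- part = part[1:-1]
    let part2 := PySem.List.slice part (some 1) (some (-1))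
    if PySem.Chars.startswith part2 ['+'] then
      params ++ [String.mk (PySem.List.slice part2 (some 1) none)]   -- params.append(part[1:])
    else
      params ++ [String.mk part2]                                     -- params.append(part)
  else params

def GetParamsFromPath (path : String) : List String :=
  -- path = path.split(':')[0]  (split with a nonempty separator is never empty, so [0] is the head)
  let path0 := (PySem.Chars.splitOn path.toList [':']).headD []
  -- parts = path.split('/')
  let parts := PySem.Chars.splitOn path0 ['/']
  parts.foldl aBody []

-- ===== PORT B =====
-- _flush(seg, params): seg[:1] / seg[-1:] / seg[1:-1] / inner[:1] / inner[1:] are PySem.List.slice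
def altFlush (seg : List Char) (params : List String) : List String :=
  if decide (2 ≤ seg.length) && (PySem.List.slice seg none (some 1) == ['{'])
      && (PySem.List.slice seg (some (-1)) none == ['}']) then
    let inner := PySem.List.slice seg (some 1) (some (-1))
    params ++ [String.mk (if PySem.List.slice inner none (some 1) == ['+']
                          then PySem.List.slice inner (some 1) none else inner)]
  else params

-- the for/break loop of B: scan chars, flush at '/' and at the terminating ':' / end
def altLoop : List Char → List Char → List String → List String
  | [], seg, params => altFlush seg params
  | c :: rest, seg, params =>
    if c = ':' then altFlush seg params
    else if c = '/' then altLoop rest [] (altFlush seg params)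
    else altLoop rest (seg ++ [c]) params

def GetParamsFromPath_alt (path : String) : List String := altLoop path.toList [] []

-- ===== PRECONDITION & SPEC =====
def Spec_GetParamsFromPath (path : String) (out : List String) : Prop := out = GetParamsFromPath_alt path
instance (path : String) (out : List String) : Decidable (Spec_GetParamsFromPath path out) := by unfold Spec_GetParamsFromPath; infer_instance

-- ===== CLAIM (what is proved, stated in full; the proofs are below) =====
def Claim_equal_GetParamsFromPath : Prop := ∀ (path : String), Dom_GetParamsFromPath path → Spec_GetParamsFromPath path (GetParamsFromPath path)

-- ===== LEMMAS AND PROOFS =====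

-- reference single-character splitter (proof-side only)
def splitCh (p : Char) : List Char → List (List Char)
  | [] => [[]]
  | c :: rest => if c = p then [] :: splitCh p rest else (splitCh p rest).modifyHead (c :: ·)

theorem splitCh_head (p : Char) (l : List Char) :
    ∃ t, splitCh p l = (l.takeWhile (fun c => c != p)) :: t := by
  induction l with
  | nil => exact ⟨[], rfl⟩
  | cons c rest ih =>
    obtain ⟨t, ht⟩ := ih
    by_cases hc : c = p
    · exact ⟨splitCh p rest, by simp [splitCh, hc]⟩
    · exact ⟨t, by simp [splitCh, hc, ht, List.modifyHead, bne]⟩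

theorem splitOn_go_eq (p : Char) (fuel : Nat) :
    ∀ (l cur : List Char) (acc : List (List Char)), l.length < fuel →
      PySem.Chars.splitOn.go [p] fuel l cur acc
        = acc.reverse ++ (splitCh p l).modifyHead (cur.reverse ++ ·) := by
  induction fuel with
  | zero => intro l cur acc h; omega
  | succ fuel ih =>
    intro l cur acc h
    cases l with
    | nil =>
      rw [PySem.Chars.splitOn.go]
      · simp [splitCh, List.modifyHead]
      · omega
    | cons c rest =>
      rw [PySem.Chars.splitOn.go]
      by_cases hc : c = p
      · simp only [List.isPrefixOf, hc, beq_self_eq_true, Bool.true_and, if_pos,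
          List.length_singleton, List.drop_succ_cons, List.drop_zero]
        rw [ih rest [] _ (by simpa using Nat.lt_of_succ_lt_succ h)]
        obtain ⟨t, ht⟩ := splitCh_head p rest
        simp [splitCh, ht, List.modifyHead]
      · have hpre : ([p].isPrefixOf (c :: rest)) = false := by
          simp only [List.isPrefixOf, Bool.and_true]
          simp
          exact fun hh => hc hh.symm
        simp only [hpre, Bool.false_eq_true, if_false]
        rw [ih rest (c :: cur) acc (by simpa using Nat.lt_of_succ_lt_succ h)]
        obtain ⟨t, ht⟩ := splitCh_head p rest
        simp [splitCh, hc, ht, List.modifyHead]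

theorem splitOn_eq_splitCh (p : Char) (l : List Char) :
    PySem.Chars.splitOn l [p] = splitCh p l := by
  unfold PySem.Chars.splitOn
  rw [splitOn_go_eq p (l.length + 1) l [] [] (by omega)]
  obtain ⟨t, ht⟩ := splitCh_head p l
  simp [ht, List.modifyHead]

theorem splitCh_append (p : Char) (pre l : List Char) (h : p ∉ pre) :
    splitCh p (pre ++ l) = (splitCh p l).modifyHead (pre ++ ·) := by
  induction pre with
  | nil =>
    obtain ⟨t, ht⟩ := splitCh_head p l
    simp [ht, List.modifyHead]
  | cons a pre ih =>
    have ha : a ≠ p := fun hap => h (by simp [hap])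
    have h' : p ∉ pre := fun hp => h (by simp [hp])
    obtain ⟨t, ht⟩ := splitCh_head p l
    simp [splitCh, ha, ih h', ht, List.modifyHead]

theorem splitCh_no_sep (p : Char) (pre : List Char) (h : p ∉ pre) :
    splitCh p pre = [pre] := by
  have := splitCh_append p pre [] h
  simpa [splitCh, List.modifyHead] using this

theorem splitCh_append_sep (p : Char) (pre t : List Char) (h : p ∉ pre) :
    splitCh p (pre ++ p :: t) = pre :: splitCh p t := by
  rw [splitCh_append p pre (p :: t) h]
  obtain ⟨u, hu⟩ := splitCh_head p t
  simp [splitCh, hu, List.modifyHead]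

-- B's flush does exactly what A's loop body does to one part
theorem flush_eq_aBody (seg : List Char) (params : List String) :
    altFlush seg params = aBody params seg := by
  rcases seg with _ | ⟨c, rest⟩
  · simp [altFlush, aBody, PySem.Chars.startswith, List.isPrefixOf]
  rcases List.eq_nil_or_concat rest with rfl | ⟨mid, d, rfl⟩
  · -- length-one segment: both conditions are false
    by_cases hc : c = '{'
    · subst hc
      simp [altFlush, aBody, PySem.Chars.startswith, PySem.Chars.endswith,
        List.isPrefixOf, List.isSuffixOf]
    · simp only [altFlush, aBody, PySem.Chars.startswith, List.isPrefixOf]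
      simp
      exact fun h _ => absurd h.symm hc
  · -- seg = c :: mid ++ [d], length ≥ 2
    simp only [List.concat_eq_append]
    have hsw : PySem.Chars.startswith (c :: (mid ++ [d])) ['{'] = (c == '{') := by
      simp [PySem.Chars.startswith, List.isPrefixOf, eq_comm]
    have hew : PySem.Chars.endswith (c :: (mid ++ [d])) ['}'] = (d == '}') := by
      simp [PySem.Chars.endswith, List.isSuffixOf, List.isPrefixOf, eq_comm]
    have htake : PySem.List.slice (c :: (mid ++ [d])) none (some 1) = [c] := by
      rw [show (1:Int) = ((1:Nat):Int) by norm_num, PySem.List.slice_to_natCast]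
      simp
    have hdrop : PySem.List.slice (c :: (mid ++ [d])) (some (-1)) none = [d] := by
      rw [PySem.List.slice_from_neg_one]
      have : (c :: (mid ++ [d])).length - 1 = (c :: mid).length := by simp
      rw [this, show (c :: (mid ++ [d])) = (c :: mid) ++ [d] by simp,
        List.drop_left]
    have hinner : PySem.List.slice (c :: (mid ++ [d])) (some 1) (some (-1)) = mid := by
      simp only [PySem.List.slice, PySem.List.clampIdx]
      norm_num
      rw [if_neg (by omega)]
      exact List.take_left' (by omega)
    simp only [altFlush, aBody, hsw, hew, htake, hdrop, hinner]
    have hlen : decide (2 ≤ (c :: (mid ++ [d])).length) = true := by simp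
    rw [hlen]
    have hplus : PySem.Chars.startswith mid ['+'] =
        (PySem.List.slice mid none (some 1) == ['+']) := by
      rw [show (1:Int) = ((1:Nat):Int) by norm_num, PySem.List.slice_to_natCast]
      cases mid with
      | nil => simp [PySem.Chars.startswith, List.isPrefixOf]
      | cons m ms => simp [PySem.Chars.startswith, List.isPrefixOf, eq_comm]
    have hdrop1 : PySem.List.slice mid (some 1) none = mid.drop 1 := by
      rw [show (1:Int) = ((1:Nat):Int) by norm_num, PySem.List.slice_from_natCast]
    simp only [Bool.true_and, hplus, hdrop1]
    by_cases hb : (PySem.List.slice mid none (some 1) == ['+']) = true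
    · simp [hb]
    · simp [Bool.eq_false_iff.mpr hb]

-- the scan loop equals A's fold over the '/'-pieces of the untouched suffix
theorem loop_eq (l : List Char) :
    ∀ (seg : List Char) (params : List String), ('/' : Char) ∉ seg →
      altLoop l seg params
        = (splitCh '/' (seg ++ l.takeWhile (fun c => c != ':'))).foldl aBody params := by
  induction l with
  | nil =>
    intro seg params h
    simp [altLoop, flush_eq_aBody, splitCh_no_sep '/' seg h]
  | cons c rest ih =>
    intro seg params h
    by_cases hc : c = ':'
    · subst hc
      simp [altLoop, flush_eq_aBody, List.takeWhile, splitCh_no_sep '/' seg h]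
    · by_cases hs : c = '/'
      · subst hs
        have : (('/' : Char) :: rest).takeWhile (fun c => c != ':')
            = '/' :: rest.takeWhile (fun c => c != ':') := by simp
        rw [altLoop, if_neg (by simp [hc]), if_pos rfl, flush_eq_aBody, this,
          splitCh_append_sep '/' seg _ h, List.foldl_cons,
          ih [] (aBody params seg) (by simp)]
        simp

      · have : ((c : Char) :: rest).takeWhile (fun c => c != ':')
            = c :: rest.takeWhile (fun c => c != ':') := by simp [hc]
        rw [altLoop, if_neg (by simp [hc]), if_neg (by simp [hs]), this,
          ih (seg ++ [c]) params (by simp [h, Ne.symm hs])]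
        simp

-- ===== VERDICT (by name: the statement is the Claim_ definition above) =====
theorem GetParamsFromPath_spec : Claim_equal_GetParamsFromPath := by
  intro path _
  show GetParamsFromPath path = GetParamsFromPath_alt path
  unfold GetParamsFromPath GetParamsFromPath_alt
  obtain ⟨t, ht⟩ := splitCh_head ':' path.toList
  rw [loop_eq path.toList [] [] (by simp), splitOn_eq_splitCh, ht]
  simp [splitOn_eq_splitCh]
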